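-- pv_equiv track=rewrite | github.com/quangloc99/electric-engineering-lab1 | truth-table.py | func
-- ===== SOURCE A (Python) =====
-- from itertools import combinations
--
-- def func(num):
--     for comb in combinations(range(5), 3):
--         cur_ans = True
--         for x in comb:
--             cur_ans = cur_ans and (((num >> x) & 1) == True)
--         if cur_ans:
--             return True
--     return False
-- ===== SOURCE B (Python) =====
-- def func(num):
--     c = 0
--     for x in range(5):
--         c += (num >> x) & 1
--     return c >= 3
-- ===== Notes on version B (the rewrite author's own statement) =====
-- stated objective: simpler
-- what changed: replaces the enumeration of all three-element combinations of the low bit positions with a single pass that counts the set bits among the lowest five and compares the count against the threshold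
import Mathlib
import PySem

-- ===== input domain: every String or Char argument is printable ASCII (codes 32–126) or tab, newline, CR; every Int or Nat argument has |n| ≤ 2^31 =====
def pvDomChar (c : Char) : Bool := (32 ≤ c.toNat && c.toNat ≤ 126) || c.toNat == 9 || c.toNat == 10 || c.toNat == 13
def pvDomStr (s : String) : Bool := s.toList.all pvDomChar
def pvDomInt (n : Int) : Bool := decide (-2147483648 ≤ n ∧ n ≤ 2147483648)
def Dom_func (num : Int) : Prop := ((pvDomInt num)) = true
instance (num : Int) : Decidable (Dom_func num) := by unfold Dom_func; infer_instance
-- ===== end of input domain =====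

-- B counts the set bits among the lowest five in one pass instead of enumerating all 3-element combinations; objective: simpler.
-- ===== PORT A =====
-- itertools.combinations(range(5), 3) in its generation order
def funcCombs : List (List Nat) :=
  [[0,1,2],[0,1,3],[0,1,4],[0,2,3],[0,2,4],[0,3,4],[1,2,3],[1,2,4],[1,3,4],[2,3,4]]

-- inner loop: cur_ans = cur_ans and (((num >> x) & 1) == True)   (True == 1 in Python)
def funcInner (num : Int) (comb : List Nat) : Bool :=
  comb.foldl (fun cur x => cur && (PySem.Int.band (num >>> x) 1 == 1)) true

-- outer loop with early return True, else False at the end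
def funcLoop (num : Int) : List (List Nat) → Bool
  | [] => false
  | c :: rest => if funcInner num c then true else funcLoop num rest

def func (num : Int) : Bool := funcLoop num funcCombs

-- ===== PORT B =====
def func_alt (num : Int) : Bool :=
  ((PySem.List.pyRange 0 5 1).foldl (fun c x => c + PySem.Int.band (num >>> x.toNat) 1) 0) ≥ 3

-- ===== PRECONDITION & SPEC =====
def Spec_func (num : Int) (out : Bool) : Prop := out = func_alt num
instance (num : Int) (out : Bool) : Decidable (Spec_func num out) := by unfold Spec_func; infer_instance

-- ===== CLAIM (what is proved, stated in full; the proofs are below) =====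
def Claim_equal_func : Prop := ∀ (num : Int), Dom_func num → Spec_func num (func num)

-- ===== LEMMAS AND PROOFS =====

-- each term (num >> x) & 1 is 0 or 1
lemma bit01 (num : Int) (x : Int) :
    PySem.Int.band (num >>> x) 1 = 0 ∨ PySem.Int.band (num >>> x) 1 = 1 := by
  rw [PySem.Int.band_one]
  have h1 := PySem.Int.mod_nonneg (num >>> x) (b := 2) (by norm_num)
  have h2 := PySem.Int.mod_lt (num >>> x) (b := 2) (by norm_num)
  omega

-- B's counting loop, written out as the sum of the five bits
lemma alt_eq (num : Int) :
    func_alt num = decide (3 ≤ PySem.Int.band (num >>> (0:Int)) 1 + PySem.Int.band (num >>> (1:Int)) 1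
      + PySem.Int.band (num >>> (2:Int)) 1 + PySem.Int.band (num >>> (3:Int)) 1 + PySem.Int.band (num >>> (4:Int)) 1) := by
  simp [func_alt, PySem.List.pyRange, List.range_succ, Int.toNat]

-- ===== VERDICT (by name: the statement is the Claim_ definition above) =====
set_option maxHeartbeats 1000000 in
theorem func_spec : Claim_equal_func := by
  intro num _
  unfold Spec_func func funcCombs
  rw [alt_eq]
  rcases bit01 num 0 with h0 | h0 <;>
  rcases bit01 num 1 with h1 | h1 <;>
  rcases bit01 num 2 with h2 | h2 <;>
  rcases bit01 num 3 with h3 | h3 <;>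
  rcases bit01 num 4 with h4 | h4 <;>
  simp [funcLoop, funcInner, h0, h1, h2, h3, h4]
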